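-- pv_equiv track=rewrite | github.com/thealper2/codewars-solutions | 7-kyu/reverse_factorials.py | reverse_factorial
-- ===== SOURCE A (Python) =====
-- def reverse_factorial(num):
--     s = 1
--     c = 1
--     while s < num:
--         c += 1
--         s *= c
--
--     if s != num:
--         return "None"
--
--     return f"{c}!"
-- ===== SOURCE B (Python) =====
-- def reverse_factorial(num):
--     n = num
--     c = 1
--     while n > 1:
--         c += 1
--         if n % c != 0:
--             return "None"
--         n //= c
--     if n != 1:
--         return "None"
--     return f"{c}!"
-- ===== Notes on version B (the rewrite author's own statement) =====
-- stated objective: alternative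
-- what changed: B factors num downward, dividing by an increasing counter and bailing out at the first non-divisor, instead of multiplying a factorial upward until it reaches num.
import Mathlib
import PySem

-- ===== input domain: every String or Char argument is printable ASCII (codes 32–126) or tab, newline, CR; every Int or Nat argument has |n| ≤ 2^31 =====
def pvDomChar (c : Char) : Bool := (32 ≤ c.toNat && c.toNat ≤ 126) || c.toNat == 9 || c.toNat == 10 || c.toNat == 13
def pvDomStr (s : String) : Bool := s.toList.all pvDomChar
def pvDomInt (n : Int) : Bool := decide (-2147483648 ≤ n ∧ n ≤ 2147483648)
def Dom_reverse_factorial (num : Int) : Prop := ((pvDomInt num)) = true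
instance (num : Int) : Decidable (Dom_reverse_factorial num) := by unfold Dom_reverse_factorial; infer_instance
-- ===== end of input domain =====

-- B factors num downward by dividing out c = 2, 3, … instead of building the factorial upward; same result, alternative decomposition.

-- ===== PORT A =====
-- termination facts for the loops, named so the definitions stay small
theorem pvFactLoop_hs {c s : Int} (hc : 1 ≤ c) (hs : 1 ≤ s) : 1 ≤ s * (c + 1) :=
  le_trans hs (le_mul_of_one_le_right (le_trans zero_le_one hs) (Int.le_add_one hc))

theorem pvFactLoop_dec {num c s : Int} (hc : 1 ≤ c) (hs : 1 ≤ s) (h : s < num) :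
    (num - s * (c + 1)).toNat < (num - s).toNat := by
  have h1 : s + 1 ≤ s * (c + 1) := by nlinarith
  omega

theorem pvDivLoop_dec {c n : Int} (hc : 1 ≤ c) (h : 1 < n) :
    (PySem.Int.floordiv n (c + 1)).toNat < n.toNat := by
  rw [PySem.Int.floordiv_eq_ediv_of_pos (by omega)]
  have hq : 0 ≤ n / (c + 1) := Int.ediv_nonneg (by omega) (by omega)
  have hqr := Int.emod_add_mul_ediv n (c + 1)
  have hr0 := Int.emod_nonneg n (by omega : (c + 1 : Int) ≠ 0)
  have hlt : n / (c + 1) < n := by nlinarith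
  omega

-- while s < num: c += 1; s *= c   (invariant hypotheses 1 ≤ c, 1 ≤ s only justify termination)
def pvFactLoop (num c s : Int) (hc : 1 ≤ c) (hs : 1 ≤ s) : String :=
  if h : s < num then
    pvFactLoop num (c + 1) (s * (c + 1)) (Int.le_add_one hc) (pvFactLoop_hs hc hs)
  else if s ≠ num then "None"
  else PySem.Int.toStr c ++ "!"
termination_by (num - s).toNat
decreasing_by exact pvFactLoop_dec hc hs h

def reverse_factorial (num : Int) : String :=
  pvFactLoop num 1 1 (le_refl 1) (le_refl 1)

-- ===== PORT B =====
-- while n > 1: c += 1; if n % c != 0: return "None"; n //= c   (hypothesis 1 ≤ c only justifies termination)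
def pvDivLoop (c n : Int) (hc : 1 ≤ c) : String :=
  if h : 1 < n then
    if hm : PySem.Int.mod n (c + 1) ≠ 0 then "None"
    else pvDivLoop (c + 1) (PySem.Int.floordiv n (c + 1)) (Int.le_add_one hc)
  else if n ≠ 1 then "None"
  else PySem.Int.toStr c ++ "!"
termination_by n.toNat
decreasing_by exact pvDivLoop_dec hc h

def reverse_factorial_alt (num : Int) : String :=
  pvDivLoop 1 num (le_refl 1)

-- ===== PRECONDITION & SPEC =====
def Spec_reverse_factorial (num : Int) (out : String) : Prop := out = reverse_factorial_alt num
instance (num : Int) (out : String) : Decidable (Spec_reverse_factorial num out) := by unfold Spec_reverse_factorial; infer_instance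

-- ===== CLAIM (what is proved, stated in full; the proofs are below) =====
def Claim_equal_reverse_factorial : Prop := ∀ (num : Int), Dom_reverse_factorial num → Spec_reverse_factorial num (reverse_factorial num)

-- ===== LEMMAS AND PROOFS =====

-- congruence helpers: the loop functions do not depend on their proof arguments
theorem pvFactLoop_congr {num c s num' c' s' : Int} (h1 : num = num') (h2 : c = c') (h3 : s = s')
    (ha : 1 ≤ c) (hb : 1 ≤ s) (ha' : 1 ≤ c') (hb' : 1 ≤ s') :
    pvFactLoop num c s ha hb = pvFactLoop num' c' s' ha' hb' := by subst h1 h2 h3; rfl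

theorem pvDivLoop_congr {c n c' n' : Int} (h1 : c = c') (h2 : n = n')
    (ha : 1 ≤ c) (ha' : 1 ≤ c') :
    pvDivLoop c n ha = pvDivLoop c' n' ha' := by subst h1 h2; rfl

-- If num = c! * n with (c+1) ∤ n and 2 ≤ n, then no k! (for k > c) equals num, so A's loop returns "None".
theorem pvFactLoop_none (k c : Nat) (n : Int) (hck : c < k) (hn : 2 ≤ n)
    (hnd : ¬ ((c : Int) + 1 ∣ n)) (hk : 1 ≤ (k : Int)) (hs : 1 ≤ ((Nat.factorial k : Nat) : Int)) :
    pvFactLoop ((Nat.factorial c : Nat) * n) (k : Int) ((Nat.factorial k : Nat) : Int) hk hs = "None" := by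
  rw [pvFactLoop]
  by_cases h : ((Nat.factorial k : Nat) : Int) < (Nat.factorial c : Nat) * n
  · rw [dif_pos h]
    have hcast : ((k : Int) + 1) = ((k + 1 : Nat) : Int) := by push_cast; ring
    have hfac : ((Nat.factorial k : Nat) : Int) * ((k : Int) + 1) = ((Nat.factorial (k + 1) : Nat) : Int) := by
      rw [hcast]
      push_cast [Nat.factorial_succ]
      ring
    have key := pvFactLoop_none (k + 1) c n (by omega) hn hnd
      (by push_cast; omega) (by rw [← hfac]; nlinarith)
    exact (pvFactLoop_congr rfl hcast hfac _ _ _ _).trans key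
  · rw [dif_neg h]
    have hne : ((Nat.factorial k : Nat) : Int) ≠ (Nat.factorial c : Nat) * n := by
      intro heq
      have hdvd : Nat.factorial (c + 1) ∣ Nat.factorial k := Nat.factorial_dvd_factorial (by omega)
      obtain ⟨m, hm⟩ := hdvd
      have hsplit : ((Nat.factorial c : Nat) : Int) * n = (Nat.factorial c : Nat) * (((c : Int) + 1) * m) := by
        rw [← heq, hm]
        push_cast [Nat.factorial_succ]
        ring
      have hn' : n = ((c : Int) + 1) * (m : Int) :=
        mul_left_cancel₀ (by exact_mod_cast (Nat.factorial_pos c).ne' : ((Nat.factorial c : Nat) : Int) ≠ 0) hsplit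
      exact hnd ⟨m, hn'⟩
    rw [if_pos hne]
termination_by ((Nat.factorial c : Nat) * n - (Nat.factorial k : Nat)).toNat
decreasing_by
  have h1 : (Nat.factorial k : Int) < (Nat.factorial (k + 1) : Nat) := by
    have := Nat.factorial_lt (n := k) (m := k + 1) (by omega)
    exact_mod_cast this.mpr (by omega)
  omega

-- Main bridge: with num = c! * n (n ≥ 1), B's division loop from (c, n) agrees with A's loop from (c, c!).
theorem pvLoop_bridge (n : Int) (c : Nat) (hn : 1 ≤ n) (hc1 : 1 ≤ (c : Int))
    (hs : 1 ≤ ((Nat.factorial c : Nat) : Int)) :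
    pvDivLoop (c : Int) n hc1 = pvFactLoop ((Nat.factorial c : Nat) * n) (c : Int) ((Nat.factorial c : Nat) : Int) hc1 hs := by
  rw [pvDivLoop, pvFactLoop]
  by_cases h : 1 < n
  · rw [dif_pos h]
    have hfpos : (0 : Int) < (Nat.factorial c : Nat) := by exact_mod_cast Nat.factorial_pos c
    have hlt : ((Nat.factorial c : Nat) : Int) < (Nat.factorial c : Nat) * n := by nlinarith
    rw [dif_pos hlt]
    have hcast : ((c : Int) + 1) = ((c + 1 : Nat) : Int) := by push_cast; ring
    have hfac : ((Nat.factorial c : Nat) : Int) * ((c : Int) + 1) = ((Nat.factorial (c + 1) : Nat) : Int) := by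
      rw [hcast]; push_cast [Nat.factorial_succ]; ring
    by_cases hm : PySem.Int.mod n ((c : Int) + 1) ≠ 0
    · rw [dif_pos hm]
      have hnd : ¬ ((c : Int) + 1 ∣ n) := by
        intro hd
        exact hm ((PySem.Int.mod_eq_zero_iff_dvd n ((c : Int) + 1)).mpr hd)
      have key := pvFactLoop_none (c + 1) c n (by omega) (by omega) hnd (by push_cast; omega)
        (by rw [← hfac]; nlinarith)
      exact ((pvFactLoop_congr rfl hcast hfac _ _ _ _).trans key).symm
    · rw [dif_neg hm]
      push Not at hm
      have hdvd : ((c : Int) + 1) ∣ n := (PySem.Int.mod_eq_zero_iff_dvd n ((c : Int) + 1)).mp hm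
      obtain ⟨n', hn'⟩ := hdvd
      have hfd : PySem.Int.floordiv n ((c : Int) + 1) = n' := by
        rw [PySem.Int.floordiv_eq_ediv_of_pos (by omega), hn', Int.mul_ediv_cancel_left _ (by omega)]
      have hn'1 : 1 ≤ n' := by nlinarith
      have heq2 : ((Nat.factorial c : Nat) : Int) * n = ((Nat.factorial (c + 1) : Nat) : Int) * n' := by
        rw [← hfac, hn']; ring
      have IH := pvLoop_bridge n' (c + 1) hn'1 (by push_cast; omega)
        (by exact_mod_cast Nat.factorial_pos (c + 1))
      calc pvDivLoop ((c : Int) + 1) (PySem.Int.floordiv n ((c : Int) + 1)) (by omega)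
          = pvDivLoop ((c + 1 : Nat) : Int) n' (by push_cast; omega) := pvDivLoop_congr hcast hfd _ _
        _ = pvFactLoop (((Nat.factorial (c + 1) : Nat) : Int) * n') ((c + 1 : Nat) : Int)
              ((Nat.factorial (c + 1) : Nat) : Int) _ _ := IH
        _ = pvFactLoop ((Nat.factorial c : Nat) * n) ((c : Int) + 1)
              ((Nat.factorial c : Nat) * ((c : Int) + 1)) (by omega) (by nlinarith) :=
            pvFactLoop_congr heq2.symm hcast.symm hfac.symm _ _ _ _
  · rw [dif_neg h]
    have hn1 : n = 1 := by omega
    subst hn1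
    have hnot : ¬ ((Nat.factorial c : Nat) : Int) < (Nat.factorial c : Nat) * 1 := by omega
    rw [dif_neg hnot]
    simp
termination_by n.toNat
decreasing_by
  have h3 : n' < n := by nlinarith [hn', hn'1, hc1]
  omega

-- ===== VERDICT (by name: the statement is the Claim_ definition above) =====
theorem reverse_factorial_spec : Claim_equal_reverse_factorial := by
  intro num _
  unfold Spec_reverse_factorial reverse_factorial reverse_factorial_alt
  by_cases h : 1 ≤ num
  · exact (pvFactLoop_congr (one_mul num).symm rfl rfl (by omega) (by omega) (by decide)
      (by decide)).trans (pvLoop_bridge num 1 h (by decide) (by decide)).symm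
  · rw [pvFactLoop, pvDivLoop]
    rw [dif_neg (by omega : ¬ (1 : Int) < num), dif_neg (by omega : ¬ (1 : Int) < num)]
    rw [if_pos (by omega : (1 : Int) ≠ num), if_pos (by omega : num ≠ 1)]
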